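-- pv_equiv track=rewrite | github.com/signode-canada-admin/signode-api | SIGNODE API/TABULA_EXTRACTION/bunzl_industrial_extraction/data_extract.py | get_only_line_items
-- ===== SOURCE A (Python) =====
-- def ret_index(data):
--     '''
--     data (type: []): first column of the table
--     return (type: int): return index of the po_no
--
--     item list starts at ret_index(data)+2
--     '''
--     if 'quantity' in data[0][0].lower() or 'stock' in data[0][1].lower():
--         if "---" in data[1][0].lower():
--             return 2
--         return 1
--     elif "---" in data[0][0].lower():
--         return 1
--     return 0
--
-- def get_only_line_items(rows):
--     rows = rows[ret_index(rows):]
--     ret_arr = []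
--     temp = []
--     for row in rows:
--         if "---" in row[0]:
--             ret_arr.append(temp)
--             temp = []
--         else:
--             temp.append(row)
--     return ret_arr
-- ===== SOURCE B (Python) =====
-- def ret_index(data):
--     '''
--     data (type: []): first column of the table
--     return (type: int): return index of the po_no
--
--     item list starts at ret_index(data)+2
--     '''
--     if 'quantity' in data[0][0].lower() or 'stock' in data[0][1].lower():
--         if "---" in data[1][0].lower():
--             return 2
--         return 1
--     elif "---" in data[0][0].lower():
--         return 1
--     return 0
--
-- def get_only_line_items(rows):
--     rows = rows[ret_index(rows):]
--     marks = [i for i, row in enumerate(rows) if "---" in row[0]]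
--     out = []
--     prev = 0
--     for cur in marks:
--         out.append(rows[prev:cur])
--         prev = cur + 1
--     return out
-- ===== Notes on version B (the rewrite author's own statement) =====
-- stated objective: alternative
-- what changed: Replaces A's single accumulate-and-flush loop (carrying a temp group that is appended on each delimiter) by first computing the list of delimiter positions via enumerate and then emitting each group as a slice rows[prev:cur] between consecutive delimiters; the dropped trailing segment after the last delimiter is reproduced because no slice is emitted after the final mark.
import Mathlib
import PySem

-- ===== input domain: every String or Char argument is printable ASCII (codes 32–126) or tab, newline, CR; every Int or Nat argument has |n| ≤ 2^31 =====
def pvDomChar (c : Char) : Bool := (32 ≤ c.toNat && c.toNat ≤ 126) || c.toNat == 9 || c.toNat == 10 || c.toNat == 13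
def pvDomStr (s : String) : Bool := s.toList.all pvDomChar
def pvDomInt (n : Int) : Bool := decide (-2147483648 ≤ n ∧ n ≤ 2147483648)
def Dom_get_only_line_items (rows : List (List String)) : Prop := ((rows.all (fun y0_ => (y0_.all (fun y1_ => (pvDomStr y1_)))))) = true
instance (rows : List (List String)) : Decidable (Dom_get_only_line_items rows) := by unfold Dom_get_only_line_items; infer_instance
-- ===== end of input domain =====

-- B groups rows by slicing between precomputed delimiter positions instead of A's accumulate-and-flush loop; equivalence of return values is proved on Pre_ (inputs where A does not raise an IndexError).


-- ===== PORT A =====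
-- '"---" in row[0]' (row[0] totalized with a default; Pre_ guarantees row ≠ [])
def pvDelim (row : List String) : Bool :=
  PySem.Str.isIn "---" ((PySem.List.pyGet? row 0).getD "")

def ret_index (data : List (List String)) : Int :=
  let row0 := (PySem.List.pyGet? data 0).getD []
  let row1 := (PySem.List.pyGet? data 1).getD []
  if PySem.Str.isIn "quantity" (PySem.Str.lower ((PySem.List.pyGet? row0 0).getD ""))
      || PySem.Str.isIn "stock" (PySem.Str.lower ((PySem.List.pyGet? row0 1).getD "")) then
    if PySem.Str.isIn "---" (PySem.Str.lower ((PySem.List.pyGet? row1 0).getD "")) then 2 else 1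
  else if PySem.Str.isIn "---" (PySem.Str.lower ((PySem.List.pyGet? row0 0).getD "")) then 1
  else 0

def get_only_line_items (rows : List (List String)) : List (List (List String)) :=
  let rows2 := PySem.List.slice rows (some (ret_index rows)) none
  (rows2.foldl
    (fun (st : List (List (List String)) × List (List String)) row =>
      if pvDelim row then (st.1 ++ [st.2], []) else (st.1, st.2 ++ [row]))
    ([], [])).1

-- ===== PORT B =====
def get_only_line_items_alt (rows : List (List String)) : List (List (List String)) :=
  let rows2 := PySem.List.slice rows (some (ret_index rows)) none
  let marks := ((PySem.List.enumerate rows2 0).filter (fun p => pvDelim p.2)).map (·.1)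
  (marks.foldl
    (fun (st : List (List (List String)) × Int) cur =>
      (st.1 ++ [PySem.List.slice rows2 (some st.2) (some cur)], cur + 1))
    ([], 0)).1

-- ===== PRECONDITION & SPEC =====
-- Pre_ is exactly the inputs on which the Python A returns (no IndexError): rows nonempty, every
-- row nonempty, and rows[0][1] / rows[1][0] exist exactly where ret_index's short-circuiting reads them.
def Pre_get_only_line_items (rows : List (List String)) : Prop :=
  rows ≠ [] ∧ (∀ r ∈ rows, r ≠ []) ∧
  (let row0 := rows.headD []
   if PySem.Str.isIn "quantity" (PySem.Str.lower ((PySem.List.pyGet? row0 0).getD "")) then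
     2 ≤ rows.length
   else
     2 ≤ row0.length ∧
     (PySem.Str.isIn "stock" (PySem.Str.lower ((PySem.List.pyGet? row0 1).getD "")) = true →
       2 ≤ rows.length))
instance (rows : List (List String)) : Decidable (Pre_get_only_line_items rows) := by
  unfold Pre_get_only_line_items; infer_instance

def pvWitness_get_only_line_items : List (List String) := [["a", "b"], ["x"], ["---"]]

def Spec_get_only_line_items (rows : List (List String)) (out : List (List (List String))) : Prop := out = get_only_line_items_alt rows
instance (rows : List (List String)) (out : List (List (List String))) : Decidable (Spec_get_only_line_items rows out) := by unfold Spec_get_only_line_items; infer_instance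

-- ===== CLAIM (what is proved, stated in full; the proofs are below) =====
def Claim_equal_get_only_line_items : Prop := ∀ (rows : List (List String)), Dom_get_only_line_items rows → Pre_get_only_line_items rows → Spec_get_only_line_items rows (get_only_line_items rows)

-- ===== LEMMAS AND PROOFS =====

-- A's accumulate-and-flush loop, front recursion (acc stripped off).
def pvG (rs : List (List String)) (temp : List (List String)) : List (List (List String)) :=
  match rs with
  | [] => []
  | r :: rs => if pvDelim r then temp :: pvG rs [] else pvG rs (temp ++ [r])

-- B's mark list over a suffix, with starting index s.
def pvM (rs : List (List String)) (s : Int) : List Int :=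
  ((PySem.List.enumerate rs s).filter (fun p => pvDelim p.2)).map (·.1)

-- B's slicing loop, front recursion.
def pvBl (full : List (List String)) (marks : List Int) (prev : Int) : List (List (List String)) :=
  match marks with
  | [] => []
  | c :: ms => PySem.List.slice full (some prev) (some c) :: pvBl full ms (c + 1)

theorem pvG_foldl (rs : List (List String)) (acc : List (List (List String)))
    (temp : List (List String)) :
    (rs.foldl
      (fun (st : List (List (List String)) × List (List String)) row =>
        if pvDelim row then (st.1 ++ [st.2], []) else (st.1, st.2 ++ [row]))
      (acc, temp)).1 = acc ++ pvG rs temp := by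
  induction rs generalizing acc temp with
  | nil => simp [pvG]
  | cons r rs ih =>
    simp only [List.foldl_cons, pvG]
    by_cases h : pvDelim r
    · simp [h, ih]
    · simp [h, ih]

theorem pvBl_foldl (full : List (List String)) (marks : List Int)
    (acc : List (List (List String))) (prev : Int) :
    (marks.foldl
      (fun (st : List (List (List String)) × Int) cur =>
        (st.1 ++ [PySem.List.slice full (some st.2) (some cur)], cur + 1))
      (acc, prev)).1 = acc ++ pvBl full marks prev := by
  induction marks generalizing acc prev with
  | nil => simp [pvBl]
  | cons c ms ih => simp [pvBl, ih]

theorem pvM_cons (r : List String) (rs : List (List String)) (s : Int) :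
    pvM (r :: rs) s = if pvDelim r then s :: pvM rs (s + 1) else pvM rs (s + 1) := by
  by_cases h : pvDelim r <;> simp [pvM, PySem.List.enumerate_cons, h]

-- Invariant: A's temp is always the slice of the full list between the last flush t and the cursor p.
theorem pvKey (rs : List (List String)) (p t : Nat) (full : List (List String))
    (hdrop : full.drop p = rs) (hpt : t ≤ p) :
    pvG rs ((full.drop t).take (p - t)) = pvBl full (pvM rs (p : Int)) (t : Int) := by
  induction rs generalizing p t with
  | nil => simp [pvG, pvM, pvBl]
  | cons r rs ih =>
    have hp : p < full.length := by
      by_contra hge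
      have hnil : full.drop p = [] := List.drop_eq_nil_of_le (Nat.le_of_not_lt hge)
      rw [hnil] at hdrop
      exact List.cons_ne_nil r rs hdrop.symm
    have hdrop' : full.drop (p + 1) = rs := by
      have ht : (full.drop p).tail = rs := by rw [hdrop]; rfl
      rwa [List.tail_drop] at ht
    have hget : full[p]? = some r := by
      have : (full.drop p)[0]? = some r := by simp [hdrop]
      simpa [List.getElem?_drop] using this
    rw [pvM_cons]
    by_cases h : pvDelim r
    · simp only [h, if_true, pvG, pvBl]
      have hcast : (p : Int) + 1 = ((p + 1 : Nat) : Int) := by push_cast; ring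
      have htail := ih (p + 1) (p + 1) hdrop' le_rfl
      simp only [Nat.sub_self, List.take_zero] at htail
      rw [PySem.List.slice_natCast, hcast, htail]
    · simp only [h, pvG]
      have hcast : (p : Int) + 1 = ((p + 1 : Nat) : Int) := by push_cast; ring
      have htemp : (full.drop t).take (p - t) ++ [r] = (full.drop t).take (p + 1 - t) := by
        have h1 : p + 1 - t = (p - t) + 1 := by omega
        have h2 : (full.drop t)[p - t]? = some r := by
          rw [List.getElem?_drop]
          have : t + (p - t) = p := by omega
          rw [this, hget]
        rw [h1, List.take_add_one, h2]
        rfl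
      rw [htemp, hcast]
      exact ih (p + 1) t hdrop' (by omega)

-- ===== VERDICT (by name: the statement is the Claim_ definition above) =====
theorem get_only_line_items_spec : Claim_equal_get_only_line_items := by
  intro rows _ _
  unfold Spec_get_only_line_items
  show get_only_line_items rows = get_only_line_items_alt rows
  have hA : get_only_line_items rows
      = pvG (PySem.List.slice rows (some (ret_index rows)) none) [] := by
    unfold get_only_line_items
    rw [pvG_foldl]
    simp
  have hB : get_only_line_items_alt rows
      = pvBl (PySem.List.slice rows (some (ret_index rows)) none)
          (pvM (PySem.List.slice rows (some (ret_index rows)) none) 0) 0 := by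
    unfold get_only_line_items_alt
    rw [pvBl_foldl]
    simp [pvM]
  rw [hA, hB]
  have := pvKey (PySem.List.slice rows (some (ret_index rows)) none) 0 0
      (PySem.List.slice rows (some (ret_index rows)) none) (by simp) le_rfl
  simpa using this
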